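-- pv_equiv track=rewrite | github.com/ppqm/hpce_utils | src/hpce_utils/managers/uge/status.py | parse_qstatj
-- ===== SOURCE A (Python) =====
-- from typing import Dict, Iterator, List, Optional, Tuple, Union
--
-- def _get_qstatj_key(line: str) -> Tuple[Optional[str], str]:
--     """Split column key and column value from qstat -j output"""
--
--     # format:
--     # start_time            2:    01/01/1970 01:00:00.000
--     # job-array tasks:            1-3:1
--     # error reason    1:          01/31/2024 17:05:39 [94281059:32991]: can't make directory
--
--     col_key_end = 28
--
--     # Does it have some pre-defined spaces
--     spaces = line[col_key_end - 3 : col_key_end].strip()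
--     if len(spaces) > 0:
--         return None, line
--
--     if len(line) < col_key_end:
--         return None, line
--
--     key = line[:col_key_end]
--     value = line[col_key_end:]
--
--     # remove ":" colon
--     key = key.strip()[:-1]
--
--     if len(key) == 0:
--         return None, line
--
--     return key, value.strip()
--
-- def parse_qstatj(stdout: str) -> dict:
--     """Parse the stdout of qstat -j into a dict"""
--
--     out = dict()
--     lines = stdout.split("\n")
--
--     _key = None
--     for line in lines[1:]:
--
--         key, value = _get_qstatj_key(line)
--
--         if key is None:
--             key = _key
--             value = "\n" + value
--
--         _key = key
--
--         if key not in out: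
--             out[key] = ""
--
--         out[key] += value
--
--     return out
-- ===== SOURCE B (Python) =====
-- from typing import Dict, Iterator, List, Optional, Tuple, Union
--
-- def _get_qstatj_key(line: str) -> Tuple[Optional[str], str]:
--     """Split column key and column value from qstat -j output"""
--     col_key_end = 28
--     spaces = line[col_key_end - 3 : col_key_end].strip()
--     if len(spaces) > 0:
--         return None, line
--     if len(line) < col_key_end:
--         return None, line
--     key = line[:col_key_end]
--     value = line[col_key_end:]
--     key = key.strip()[:-1]
--     if len(key) == 0:
--         return None, line
--     return key, value.strip()
--
-- def parse_qstatj(stdout: str) -> dict: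
--     """Parse qstat -j output by grouping each key line with its continuation
--     lines up front (lookahead), then folding each block into the dict."""
--     out = {}
--     lines = stdout.split("\n")[1:]
--     i, n = 0, len(lines)
--     while i < n:
--         key, value = _get_qstatj_key(lines[i])
--         i += 1
--         while i < n and _get_qstatj_key(lines[i])[0] is None:
--             value += "\n" + lines[i]
--             i += 1
--         out[key] = out.get(key, "") + value
--     return out
-- ===== Notes on version B (the rewrite author's own statement) =====
-- stated objective: alternative
-- what changed: B replaces A's stateful line-by-line loop (carrying the last key and patching the dict on every line) by a lookahead grouping: each key line is grouped with its following continuation lines into one joined value and the dict is touched once per block.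
-- outside the precondition, e.g. on parse_qstatj('hdr\n   cont'): A returns {None: '\n   cont'}, B returns {None: '   cont'}
import Mathlib
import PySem

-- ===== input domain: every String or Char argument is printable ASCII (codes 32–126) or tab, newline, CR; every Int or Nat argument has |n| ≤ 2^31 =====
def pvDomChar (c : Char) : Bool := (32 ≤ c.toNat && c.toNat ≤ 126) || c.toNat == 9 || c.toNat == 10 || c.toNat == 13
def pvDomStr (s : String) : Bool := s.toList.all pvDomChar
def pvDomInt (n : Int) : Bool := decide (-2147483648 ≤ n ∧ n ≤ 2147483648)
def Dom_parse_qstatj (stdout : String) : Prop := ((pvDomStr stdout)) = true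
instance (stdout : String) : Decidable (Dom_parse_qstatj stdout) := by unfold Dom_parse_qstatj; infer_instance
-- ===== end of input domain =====

-- B replaces A's stateful line-by-line accumulator loop by lookahead grouping of each key
-- line with its continuation lines (objective: alternative decomposition, same cost).

-- ===== PORT A =====
-- port of _get_qstatj_key (shared verbatim by A's and B's Python)
def getQstatjKey (line : String) : Option String × String :=
  let colKeyEnd : Int := 28
  let spaces := PySem.Str.strip (PySem.Str.slice line (some (colKeyEnd - 3)) (some colKeyEnd))
  if PySem.Str.len spaces > 0 then (none, line)
  else if PySem.Str.len line < colKeyEnd then (none, line)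
  else
    let key := PySem.Str.slice line none (some colKeyEnd)
    let value := PySem.Str.slice line (some colKeyEnd) none
    let key' := PySem.Str.slice (PySem.Str.strip key) none (some (-1))
    if PySem.Str.len key' = 0 then (none, line)
    else (some key', PySem.Str.strip value)

-- A's for-loop; state = (dict keyed by Optional[str], _key)
def aLoop : List String → PySem.Dict (Option String) String → Option String → PySem.Dict (Option String) String
  | [], out, _ => out
  | line :: rest, out, k =>
      let kv := getQstatjKey line
      let key := if kv.1 = none then k else kv.1
      let value := if kv.1 = none then "\n" ++ kv.2 else kv.2
      let out1 := if out.contains key then out else out.insert key ""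
      aLoop rest (out1.insert key (out1.getD key "" ++ value)) key

-- stdout.split("\n"): sep ≠ "" so split? is always some
def parse_qstatj (stdout : String) : List (String × String) :=
  -- key None never occurs under Pre_; render the Option keys with getD ""
  (aLoop (PySem.List.slice ((PySem.Str.split? stdout "\n").getD []) (some 1) none)
      PySem.Dict.empty none).items.map (fun kv => (kv.1.getD "", kv.2))

-- ===== PORT B =====
-- B's outer while: group each line with the following continuation lines (inner while =
-- takeWhile/dropWhile), join them onto the value, touch the dict once per block
def bLoop : List String → PySem.Dict (Option String) String → PySem.Dict (Option String) String
  | [], out => out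
  | line :: rest, out =>
      let kv := getQstatjKey line
      let conts := rest.takeWhile (fun l => (getQstatjKey l).1 == none)
      let v := conts.foldl (fun acc c => acc ++ "\n" ++ c) kv.2
      bLoop (rest.dropWhile (fun l => (getQstatjKey l).1 == none))
        (out.insert kv.1 (out.getD kv.1 "" ++ v))
  termination_by lines => lines.length
  decreasing_by
    have := List.length_dropWhile_le (fun l => (getQstatjKey l).1 == none) rest
    simp only [List.length_cons]; omega

def parse_qstatj_alt (stdout : String) : List (String × String) :=
  (bLoop (PySem.List.slice ((PySem.Str.split? stdout "\n").getD []) (some 1) none)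
      PySem.Dict.empty).items.map (fun kv => (kv.1.getD "", kv.2))

-- ===== PRECONDITION & SPEC =====
-- the three None-branch tests of _get_qstatj_key, restated independently of the ports
def isContB (line : String) : Bool :=
  decide (PySem.Str.len (PySem.Str.strip (PySem.Str.slice line (some 25) (some 28))) > 0)
  || decide (PySem.Str.len line < 28)
  || decide (PySem.Str.len (PySem.Str.slice (PySem.Str.strip (PySem.Str.slice line none (some 28))) none (some (-1))) = 0)

-- Pre_ excludes inputs whose first parsed line (lines[1:][0]) is a continuation line: there A
-- returns a dict carrying the non-string key None, which is no value of the declared dict[str,str] type.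
def Pre_parse_qstatj (stdout : String) : Prop :=
  ((PySem.List.slice ((PySem.Str.split? stdout "\n").getD []) (some 1) none).head?.all
    (fun l => !(isContB l))) = true
instance (stdout : String) : Decidable (Pre_parse_qstatj stdout) := by unfold Pre_parse_qstatj; infer_instance

def pvWitness_parse_qstatj : String := "h\njob_number:                 1234\n  more"

def Spec_parse_qstatj (stdout : String) (out : List (String × String)) : Prop := out = parse_qstatj_alt stdout
instance (stdout : String) (out : List (String × String)) : Decidable (Spec_parse_qstatj stdout out) := by unfold Spec_parse_qstatj; infer_instance

-- ===== CLAIM (what is proved, stated in full; the proofs are below) =====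
def Claim_equal_parse_qstatj : Prop := ∀ (stdout : String), Dom_parse_qstatj stdout → Pre_parse_qstatj stdout → Spec_parse_qstatj stdout (parse_qstatj stdout)

-- ===== LEMMAS AND PROOFS =====

set_option maxHeartbeats 1000000 in
theorem isContB_iff (l : String) : (getQstatjKey l).1 = none ↔ isContB l = true := by
  simp only [getQstatjKey, isContB]
  norm_num
  split_ifs with h1 h2 h3 <;> simp_all

theorem contValue_eq (l : String) (h : (getQstatjKey l).1 = none) : (getQstatjKey l).2 = l := by
  simp only [getQstatjKey] at h ⊢
  split_ifs at h ⊢ <;> simp_all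

-- A's two dict operations on one line collapse to a single insert
theorem aStep_dict (d : PySem.Dict (Option String) String) (k : Option String) (v : String) :
    ((if d.contains k then d else d.insert k "").insert k
      ((if d.contains k then d else d.insert k "").getD k "" ++ v))
    = d.insert k (d.getD k "" ++ v) := by
  by_cases h : d.contains k = true
  · simp [h]
  · simp only [Bool.not_eq_true] at h
    simp [h, PySem.Dict.getD_insert_self, PySem.Dict.insert_insert_self,
      PySem.Dict.getD_of_not_contains _ _ h]

-- pull a constant prefix out of B's joining fold
theorem foldl_join_pull (cs : List String) (a b : String) :
    cs.foldl (fun acc c => acc ++ "\n" ++ c) (a ++ b)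
      = a ++ cs.foldl (fun acc c => acc ++ "\n" ++ c) b := by
  induction cs generalizing b with
  | nil => rfl
  | cons c cs ih =>
      rw [List.foldl_cons, List.foldl_cons,
        show a ++ b ++ "\n" ++ c = a ++ (b ++ "\n" ++ c) by
          simp [String.append_assoc]]
      exact ih (b ++ "\n" ++ c)

-- a run of continuation lines only extends the value stored at the current key
theorem aLoop_conts (conts rest : List String) (d : PySem.Dict (Option String) String)
    (k : Option String) (v : String)
    (h : ∀ l ∈ conts, (getQstatjKey l).1 = none) :
    aLoop (conts ++ rest) (d.insert k v) k
      = aLoop rest (d.insert k (conts.foldl (fun acc c => acc ++ "\n" ++ c) v)) k := by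
  induction conts generalizing v with
  | nil => simp
  | cons c cs ih =>
      have hc : (getQstatjKey c).1 = none := h c (by simp)
      show aLoop (c :: (cs ++ rest)) (d.insert k v) k = _
      simp only [aLoop, hc, contValue_eq c hc, if_pos trivial]
      rw [aStep_dict, PySem.Dict.getD_insert_self, PySem.Dict.insert_insert_self,
        ih _ (fun l hl => h l (by simp [hl]))]
      simp [String.append_assoc]

theorem aLoop_eq_bLoop (lines : List String) (d : PySem.Dict (Option String) String)
    (k : Option String)
    (h : ∀ l ∈ lines.head?, (getQstatjKey l).1 ≠ none) :
    aLoop lines d k = bLoop lines d := by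
  induction hn : lines.length using Nat.strong_induction_on generalizing lines d k with
  | _ n ih =>
    match lines with
    | [] => rw [aLoop, bLoop]
    | line :: rest =>
      have hk : (getQstatjKey line).1 ≠ none := h line (by simp)
      rw [bLoop]
      simp only [aLoop]
      rw [if_neg hk, if_neg hk, aStep_dict]
      have hdec := List.takeWhile_append_dropWhile
        (p := fun l : String => (getQstatjKey l).1 == none) (l := rest)
      have hall : ∀ l ∈ rest.takeWhile (fun l => (getQstatjKey l).1 == none),
          (getQstatjKey l).1 = none := by
        intro l hl
        simpa using List.mem_takeWhile_imp hl
      conv_lhs => rw [← hdec]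
      rw [aLoop_conts _ _ _ _ _ hall, foldl_join_pull]
      have hhead : ∀ l ∈ (rest.dropWhile (fun l => (getQstatjKey l).1 == none)).head?,
          (getQstatjKey l).1 ≠ none := by
        intro l hl
        have hd := List.head?_dropWhile_not (fun l : String => (getQstatjKey l).1 == none) rest
        rw [Option.mem_def] at hl
        rw [hl] at hd
        simp only at hd
        rw [← Option.isSome_iff_ne_none]
        simpa using hd
      have hlen : (rest.dropWhile (fun l : String => (getQstatjKey l).1 == none)).length < n := by
        have := List.length_dropWhile_le (fun l : String => (getQstatjKey l).1 == none) rest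
        simp only [← hn, List.length_cons]; omega
      exact ih _ hlen _ _ _ hhead rfl

-- ===== VERDICT (by name: the statement is the Claim_ definition above) =====
theorem parse_qstatj_spec : Claim_equal_parse_qstatj := by
  intro stdout _ hpre
  unfold Spec_parse_qstatj parse_qstatj parse_qstatj_alt
  rw [aLoop_eq_bLoop]
  intro l hl
  unfold Pre_parse_qstatj at hpre
  rw [Ne, isContB_iff]
  simp only [Option.all_eq_true] at hpre
  have := hpre l hl
  simpa using this
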